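-- pv_equiv track=rewrite | github.com/youth4ever/orion | Project EULER/pb103 Special subset sums - optimum.py | rcheck
-- ===== SOURCE A (Python) =====
-- import itertools
-- import itertools
--
-- def check (s):
--     ss = [ list (itertools.combinations (s, i)) for i in range (1, len (s)+1) ]
--     sum_ss = [ [ sum (y) for y in x ] for x in ss ]
--     for i in range (len (ss)):
--         if len (set (sum_ss[i])) != len (sum_ss[i]):
--             return False
--     for i in range (len (sum_ss)-1):
--         if max (sum_ss[i]) >= min (sum_ss[i+1]):
--             return False
--     return True
--
-- def rcheck (s, d, c, e=2):
--     if d == len (s):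
--         return [c] if check (c) else []
--     t = []
--     for i in range (-e, e, 1):
--         if s[d] + i > c[-1]:
--             r = rcheck (s, d+1, c + [s[d] + i])
--             t = t + r if r != [] else t
--     return t
-- ===== SOURCE B (Python) =====
-- import itertools
--
-- def check (s):
--     ss = [ list (itertools.combinations (s, i)) for i in range (1, len (s)+1) ]
--     sum_ss = [ [ sum (y) for y in x ] for x in ss ]
--     for i in range (len (ss)):
--         if len (set (sum_ss[i])) != len (sum_ss[i]):
--             return False
--     for i in range (len (sum_ss)-1):
--         if max (sum_ss[i]) >= min (sum_ss[i+1]):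
--             return False
--     return True
--
-- def rcheck (s, d, c, e=2):
--     # iterative depth-first search over an explicit stack instead of recursion
--     out = []
--     stack = [(d, c, e)]
--     while stack:
--         depth, cand, ee = stack.pop()
--         if depth == len (s):
--             if check (cand):
--                 out.append (cand)
--         else:
--             # push children in reverse offset order so pops visit offsets ascending
--             for i in reversed (range (-ee, ee)):
--                 v = s[depth] + i
--                 if v > cand[-1]:
--                     stack.append ((depth + 1, cand + [v], 2))
--     return out
-- ===== Notes on version B (the rewrite author's own statement) =====
-- stated objective: alternative
-- what changed: The recursive depth-first search is replaced by an iterative DFS over an explicit stack of (depth, candidate, offset-range) states, pushing children in reverse offset order so pops reproduce the recursion's result order; the 'check' validity helper is kept unchanged.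
import Mathlib
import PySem

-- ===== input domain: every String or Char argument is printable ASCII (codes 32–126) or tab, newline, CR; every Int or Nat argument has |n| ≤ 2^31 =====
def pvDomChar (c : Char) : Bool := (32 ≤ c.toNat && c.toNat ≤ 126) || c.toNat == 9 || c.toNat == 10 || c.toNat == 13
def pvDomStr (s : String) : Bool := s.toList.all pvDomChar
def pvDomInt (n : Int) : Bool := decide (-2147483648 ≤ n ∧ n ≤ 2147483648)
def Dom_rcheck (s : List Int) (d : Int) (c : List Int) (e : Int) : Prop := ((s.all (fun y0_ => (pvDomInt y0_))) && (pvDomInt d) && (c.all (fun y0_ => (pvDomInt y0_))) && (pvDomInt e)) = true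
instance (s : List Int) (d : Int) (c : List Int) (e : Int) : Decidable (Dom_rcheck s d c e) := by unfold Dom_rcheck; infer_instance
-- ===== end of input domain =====

-- B rewrites the recursive DFS as an iterative DFS over an explicit stack (objective: alternative, same cost).

-- ===== PORT A =====
-- helper 'check' from the Python module, used verbatim by both A and B
def checkFn (s : List Int) : Bool :=
  let ss := (PySem.List.pyRange 1 ((s.length : Int) + 1) 1).map
      (fun i => PySem.List.combinations s i.toNat)
  let sum_ss := ss.map (fun x => x.map (fun y => y.sum))
  -- first loop: 'return False' on a size class with a repeated sum
  if ¬ (sum_ss.all (fun l => (PySem.Set.ofList l).length == l.length)) then false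
  -- second loop: 'return False' when max of one size class ≥ min of the next
  -- (max/min of an empty class would raise in Python; that case is unreachable, the port yields false)
  else if ¬ ((sum_ss.zip sum_ss.tail).all (fun p =>
      match PySem.List.max? p.1 (fun y => y), PySem.List.min? p.2 (fun y => y) with
      | some ma, some mb => decide (ma < mb)
      | _, _ => false)) then false
  else true

-- A's recursion needs this fact for termination: a successful s[d] lookup means d < len(s)
theorem pv_lt_of_pyGet?_some {s : List Int} {d x : Int}
    (h : PySem.List.pyGet? s d = some x) : d < (s.length : Int) := by
  by_contra h'
  have hn : PySem.List.pyGet? s d = none := by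
    rw [PySem.List.pyGet?_eq_none_iff]
    intro hr
    exact h' hr.2
  rw [hn] at h
  exact Option.some_ne_none x h.symm

-- the three decreasing facts A's mutual recursion cites (kept as named lemmas)
theorem pv_decA1 (m : Nat) (e : Int) :
    6 * m + (PySem.List.pyRange (-e) e 1).length < 6 * m + (2 * e).toNat + 1 := by
  rw [PySem.List.length_pyRange_one]
  omega

theorem pv_decA2 (L : Nat) (d : Int) (n : Nat) (hd : d < (L : Int)) :
    6 * (((L : Int) - (d + 1)).toNat) + (2 * (2 : Int)).toNat + 1
      < 6 * (((L : Int) - d).toNat) + (n + 1) := by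
  have h4 : (2 * (2 : Int)).toNat = 4 := by decide
  omega

theorem pv_decA3 (a n : Nat) : a + n < a + (n + 1) := by omega

mutual
-- port of A's rcheck; the 'for i in range(-e, e, 1)' loop is rcheckLoop
def rcheck (s : List Int) (d : Int) (c : List Int) (e : Int) : List (List Int) :=
  if d = (s.length : Int) then (if checkFn c then [c] else [])
  else rcheckLoop s d c (PySem.List.pyRange (-e) e 1) []
  termination_by 6 * (((s.length : Int) - d).toNat) + (2 * e).toNat + 1
  decreasing_by exact pv_decA1 _ e

def rcheckLoop (s : List Int) (d : Int) (c : List Int) :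
    List Int → List (List Int) → List (List Int)
  | [], t => t
  | i :: rest, t =>
    match h1 : PySem.List.pyGet? s d, PySem.List.pyGet? c (-1) with
    | some sd, some cl =>
      if sd + i > cl then
        let r := rcheck s (d + 1) (c ++ [sd + i]) 2
        rcheckLoop s d c rest (if r ≠ [] then t ++ r else t)
      else rcheckLoop s d c rest t
    | _, _ => rcheckLoop s d c rest t   -- s[d] or c[-1] would raise IndexError (outside Pre_)
  termination_by l t => 6 * (((s.length : Int) - d).toNat) + l.length
  decreasing_by
  · exact pv_decA2 s.length d rest.length (pv_lt_of_pyGet?_some h1)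
  all_goals exact pv_decA3 _ _
end

-- ===== PORT B =====
-- one step of B's inner push loop: 'if s[depth]+i > cand[-1]: stack.append((depth+1, cand+[v], 2))'
def pvPush (s : List Int) (depth : Int) (cand : List Int)
    (st : List (Int × List Int × Int)) (i : Int) : List (Int × List Int × Int) :=
  match PySem.List.pyGet? s depth, PySem.List.pyGet? cand (-1) with
  | some sd, some cl =>
      if sd + i > cl then (depth + 1, cand ++ [sd + i], 2) :: st else st
  | _, _ => st   -- s[depth] or cand[-1] would raise IndexError (outside Pre_): nothing pushed

-- weight of a stack entry, used only to justify termination of the explicit-stack loop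
def pvWeight (n : Nat) (ent : Int × List Int × Int) : Nat :=
  if (n : Int) ≤ ent.1 then 1
  else (2 * ent.2.2).toNat * 5 ^ (((n : Int) - 1 - ent.1).toNat) + 1

theorem pv_weight_pos (n : Nat) (ent : Int × List Int × Int) : 1 ≤ pvWeight n ent := by
  unfold pvWeight
  split_ifs
  · exact Nat.le_refl 1
  · exact Nat.le_add_left 1 _

-- each pushed child weighs at most 5^((n-1-depth).toNat)
theorem pv_child_le {n : Nat} {depth : Int} (h : depth < (n : Int)) (cand' : List Int) :
    pvWeight n (depth + 1, cand', 2) ≤ 5 ^ (((n : Int) - 1 - depth).toNat) := by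
  unfold pvWeight
  split_ifs with h2
  · exact Nat.one_le_pow _ _ (by omega)
  · simp only at h2 ⊢
    have hm : (((n : Int) - 1 - depth).toNat) = (((n : Int) - 1 - (depth + 1)).toNat) + 1 := by
      omega
    rw [hm, pow_succ]
    have h5 : 1 ≤ 5 ^ (((n : Int) - 1 - (depth + 1)).toNat) := Nat.one_le_pow _ _ (by omega)
    have h4 : (2 * (2 : Int)).toNat = 4 := by decide
    rw [h4]
    omega

-- a pvPush step either leaves the stack alone or pushes one child at depth+1 with range 2
theorem pvPush_cases (s : List Int) (depth : Int) (cand : List Int)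
    (st : List (Int × List Int × Int)) (i : Int) :
    pvPush s depth cand st i = st ∨
      (depth < (s.length : Int) ∧
        ∃ cnd, pvPush s depth cand st i = (depth + 1, cnd, 2) :: st) := by
  unfold pvPush
  split
  · rename_i sd cl hs _
    split_ifs
    · exact Or.inr ⟨pv_lt_of_pyGet?_some hs, _, rfl⟩
    · exact Or.inl rfl
  · exact Or.inl rfl

theorem pv_foldl_id {α β : Type} (f : β → α → β) (hf : ∀ st i, f st i = st) :
    ∀ (l : List α) (st : β), l.foldl f st = st := by
  intro l
  induction l with
  | nil => intro st; rfl
  | cons x xs ih => intro st; rw [List.foldl_cons, hf]; exact ih st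

-- running the push loop adds at most (number of offsets) × 5^((len-1-depth).toNat) of weight
theorem pv_stack_sum_le (s : List Int) (depth : Int) (cand : List Int) :
    ∀ (l : List Int) (st : List (Int × List Int × Int)),
      ((l.foldl (pvPush s depth cand) st).map (pvWeight s.length)).sum
        ≤ (st.map (pvWeight s.length)).sum
          + l.length * 5 ^ (((s.length : Int) - 1 - depth).toNat) := by
  intro l
  induction l with
  | nil => intro st; simp
  | cons i t ih =>
    intro st
    rw [List.foldl_cons, List.length_cons, Nat.succ_mul]
    rcases pvPush_cases s depth cand st i with h | ⟨hd, cnd, h⟩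
    · rw [h]
      have h1 := ih st
      generalize hW : (5 : Nat) ^ (((s.length : Int) - 1 - depth).toNat) = W at h1 ⊢
      generalize hB : t.length * W = B at h1 ⊢
      omega
    · rw [h]
      have h1 := ih ((depth + 1, cnd, 2) :: st)
      have h2 := pv_child_le hd cnd
      simp only [List.map_cons, List.sum_cons] at h1
      generalize hW : (5 : Nat) ^ (((s.length : Int) - 1 - depth).toNat) = W at h1 h2 ⊢
      generalize hB : t.length * W = B at h1 ⊢
      omega

-- the decreasing fact B's stack loop cites: a popped unfinished state outweighs its pushed children
theorem pv_stack_dec (s : List Int) (depth : Int) (cand : List Int) (ee : Int)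
    (rest : List (Int × List Int × Int)) :
    ((((PySem.List.pyRange (-ee) ee 1).reverse).foldl (pvPush s depth cand) rest).map
        (pvWeight s.length)).sum
      < (((depth, cand, ee) :: rest).map (pvWeight s.length)).sum := by
  simp only [List.map_cons, List.sum_cons]
  by_cases hd : depth < (s.length : Int)
  · have h1 := pv_stack_sum_le s depth cand ((PySem.List.pyRange (-ee) ee 1).reverse) rest
    have hl : ((PySem.List.pyRange (-ee) ee 1).reverse).length = (2 * ee).toNat := by
      rw [List.length_reverse, PySem.List.length_pyRange_one]; omega
    rw [hl] at h1
    have hw : pvWeight s.length (depth, cand, ee)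
        = (2 * ee).toNat * 5 ^ (((s.length : Int) - 1 - depth).toNat) + 1 := by
      unfold pvWeight
      rw [if_neg (by simp only; omega)]
    rw [hw]
    generalize hW : (5 : Nat) ^ (((s.length : Int) - 1 - depth).toNat) = W at h1 ⊢
    generalize hK : (2 * ee).toNat * W = K at h1 ⊢
    omega
  · have hid : ∀ st i, pvPush s depth cand st i = st := by
      intro st i
      rcases pvPush_cases s depth cand st i with h | ⟨hd2, _⟩
      · exact h
      · exact absurd hd2 hd
    rw [pv_foldl_id _ hid]
    have := pv_weight_pos s.length (depth, cand, ee)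
    omega

theorem pv_decB1 (n : Nat) (ent : Int × List Int × Int) (rest : List (Int × List Int × Int)) :
    ((rest.map (pvWeight n)).sum) < (((ent :: rest).map (pvWeight n)).sum) := by
  simp only [List.map_cons, List.sum_cons]
  have := pv_weight_pos n ent
  omega

-- port of B's 'while stack:' loop; out is the accumulated result list
def rcheckStack (s : List Int) :
    List (Int × List Int × Int) → List (List Int) → List (List Int)
  | [], out => out
  | (depth, cand, ee) :: rest, out =>
    if depth = (s.length : Int) then
      rcheckStack s rest (out ++ (if checkFn cand then [cand] else []))
    else
      -- 'for i in reversed(range(-ee, ee)):' push admitted children onto the stack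
      rcheckStack s
        (((PySem.List.pyRange (-ee) ee 1).reverse).foldl (pvPush s depth cand) rest) out
  termination_by st out => (st.map (pvWeight s.length)).sum
  decreasing_by
  · exact pv_decB1 _ _ _
  · exact pv_stack_dec s depth cand ee rest

-- port of B's rcheck: seed the stack with the initial state, collect into out
def rcheck_alt (s : List Int) (d : Int) (c : List Int) (e : Int) : List (List Int) :=
  rcheckStack s [(d, c, e)] []

-- ===== PRECONDITION & SPEC =====
-- Pre_ excludes exactly the inputs on which A raises IndexError: s[d] or c[-1] is evaluated
-- (i.e. d ≠ len(s) and e > 0) with d out of range for s or c empty.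
def Pre_rcheck (s : List Int) (d : Int) (c : List Int) (e : Int) : Prop :=
  d = (s.length : Int) ∨ e ≤ 0 ∨ (-(s.length : Int) ≤ d ∧ d < (s.length : Int) ∧ c ≠ [])
instance (s : List Int) (d : Int) (c : List Int) (e : Int) : Decidable (Pre_rcheck s d c e) := by
  unfold Pre_rcheck; infer_instance
def pvWitness_rcheck : List Int × Int × List Int × Int := ([1, 2, 4], 1, [1], 2)
def Spec_rcheck (s : List Int) (d : Int) (c : List Int) (e : Int) (out : List (List Int)) : Prop := out = rcheck_alt s d c e
instance (s : List Int) (d : Int) (c : List Int) (e : Int) (out : List (List Int)) : Decidable (Spec_rcheck s d c e out) := by unfold Spec_rcheck; infer_instance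

-- ===== CLAIM (what is proved, stated in full; the proofs are below) =====
def Claim_equal_rcheck : Prop := ∀ (s : List Int) (d : Int) (c : List Int) (e : Int), Dom_rcheck s d c e → Pre_rcheck s d c e → Spec_rcheck s d c e (rcheck s d c e)

-- ===== LEMMAS AND PROOFS =====

-- shape of B's push loop: it prepends, reversed, the admitted children of the popped state
theorem pv_foldl_consIf {β : Type} (p : Int → Prop) [DecidablePred p] (g : Int → β) :
    ∀ (l : List Int) (acc : List β),
      l.foldl (fun st i => if p i then g i :: st else st) acc
        = ((l.filter (fun i => decide (p i))).map g).reverse ++ acc := by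
  intro l
  induction l with
  | nil => intro acc; simp
  | cons x xs ih =>
    intro acc
    by_cases hx : p x <;> simp [List.foldl, hx, ih]

-- A's loop, characterised: it concatenates the recursive results of the admitted children
theorem rcheckLoop_eq_some {s : List Int} {d : Int} {c : List Int} {sd cl : Int}
    (h1 : PySem.List.pyGet? s d = some sd) (h2 : PySem.List.pyGet? c (-1) = some cl) :
    ∀ (l : List Int) (t : List (List Int)),
      rcheckLoop s d c l t
        = t ++ ((l.filter (fun i => decide (sd + i > cl))).map
            (fun i => rcheck s (d + 1) (c ++ [sd + i]) 2)).flatten := by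
  intro l
  induction l with
  | nil => intro t; simp [rcheckLoop]
  | cons i rest ih =>
    intro t
    rw [rcheckLoop]
    split
    · rename_i sd' cl' hs hc'
      rw [h1] at hs
      rw [h2] at hc'
      injection hs with hs
      injection hc' with hc'
      subst hs
      subst hc'
      by_cases hc : sd + i > cl
      · rw [if_pos hc, ih]
        by_cases hr : rcheck s (d + 1) (c ++ [sd + i]) 2 = []
        · simp [hr, hc]
        · simp [hr, hc, List.append_assoc]
      · rw [if_neg hc, ih]
        simp [hc]
    · rename_i hnm
      exact (hnm sd cl h1 h2).elim

-- A's loop when s[d] or c[-1] has no value: nothing is ever appended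
theorem rcheckLoop_eq_none {s : List Int} {d : Int} {c : List Int}
    (h : PySem.List.pyGet? s d = none ∨ PySem.List.pyGet? c (-1) = none) :
    ∀ (l : List Int) (t : List (List Int)), rcheckLoop s d c l t = t := by
  intro l
  induction l with
  | nil => intro t; simp [rcheckLoop]
  | cons i rest ih =>
    intro t
    rw [rcheckLoop]
    split
    · rename_i sd' cl' hs hc'
      rcases h with h | h
      · rw [h] at hs; exact (Option.some_ne_none sd' hs.symm).elim
      · rw [h] at hc'; exact (Option.some_ne_none cl' hc'.symm).elim
    · exact ih t

-- the stack invariant: running the stack appends, in order, A's result for each pending state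
theorem rcheckStack_eq (s : List Int) :
    ∀ (st : List (Int × List Int × Int)) (out : List (List Int)),
      rcheckStack s st out
        = out ++ (st.map (fun ent => rcheck s ent.1 ent.2.1 ent.2.2)).flatten := by
  intro st out
  induction st, out using rcheckStack.induct s with
  | case1 out => simp [rcheckStack]
  | case2 cand ee rest out ih =>
    rw [dite_eq_ite] at ih
    rw [rcheckStack, if_pos rfl, ih]
    have hA : rcheck s (s.length : Int) cand ee = (if checkFn cand then [cand] else []) := by
      rw [rcheck, if_pos rfl]
    simp [hA, List.append_assoc]
  | case3 depth cand ee rest out hlen ih =>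
    rw [rcheckStack, if_neg hlen, ih]
    have hA : rcheck s depth cand ee
        = rcheckLoop s depth cand (PySem.List.pyRange (-ee) ee 1) [] := by
      rw [rcheck, if_neg hlen]
    rcases h1 : PySem.List.pyGet? s depth with _ | sd
    · have hid : ∀ st' i, pvPush s depth cand st' i = st' := by
        intro st' i; unfold pvPush; simp only [h1]
      rw [pv_foldl_id _ hid]
      simp only [List.map_cons, List.flatten_cons]
      rw [hA, rcheckLoop_eq_none (Or.inl h1)]
      simp
    · rcases h2 : PySem.List.pyGet? cand (-1) with _ | cl
      · have hid : ∀ st' i, pvPush s depth cand st' i = st' := by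
          intro st' i; unfold pvPush; simp only [h1, h2]
        rw [pv_foldl_id _ hid]
        simp only [List.map_cons, List.flatten_cons]
        rw [hA, rcheckLoop_eq_none (Or.inr h2)]
        simp
      · have hstep : ((PySem.List.pyRange (-ee) ee 1).reverse).foldl (pvPush s depth cand) rest
            = ((PySem.List.pyRange (-ee) ee 1).reverse).foldl
                (fun st' i => if sd + i > cl then (depth + 1, cand ++ [sd + i], 2) :: st' else st')
                rest := by
          refine PySem.List.foldl_congr_mem _ _ _ _ ?_
          intro acc x _
          unfold pvPush
          simp only [h1, h2]
        rw [hstep,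
          pv_foldl_consIf (p := fun i => sd + i > cl)
            (g := fun i => (depth + 1, cand ++ [sd + i], 2))]
        simp only [List.map_cons, List.flatten_cons]
        rw [hA, rcheckLoop_eq_some h1 h2]
        simp [List.filter_reverse, Function.comp]
        rfl

-- ===== VERDICT (by name: the statement is the Claim_ definition above) =====
theorem rcheck_spec : Claim_equal_rcheck := by
  intro s d c e _ _
  unfold Spec_rcheck rcheck_alt
  rw [rcheckStack_eq]
  simp
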